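-- pv_equiv track=rewrite | github.com/leonardogavaudan/leetcapital | 3016. Minimum Number of Pushes to Type Word II/python/v2.py | minimumPushes
-- ===== SOURCE A (Python) =====
-- from collections import Counter
--
-- def minimumPushes(word: str) -> int:
--     res = 0
--     index = 0
--     keys = [1] * 8
--     counter = Counter(word)
--     for _, count in counter.most_common():
--         res += keys[index] * count
--         keys[index] += 1
--         index = (index + 1) % 8
--
--     return res
-- ===== SOURCE B (Python) =====
-- from collections import Counter
--
--
-- def minimumPushes(word: str) -> int:
--     freq = Counter(word)
--     buckets = Counter(freq.values())  # how many letters occur exactly c times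
--     res = 0
--     i = 0
--     # counting sort: walk possible occurrence counts from the largest down
--     # (no count can exceed len(word)), assigning ranks in that order
--     for c in range(len(word), 0, -1):
--         for _ in range(buckets[c]):
--             res += (i // 8 + 1) * c
--             i += 1
--     return res
-- ===== Notes on version B (the rewrite author's own statement) =====
-- stated objective: alternative
-- what changed: Replaces most_common()'s comparison sort and the mutable cyclic 8-slot keys array with a counting sort: letter frequencies are bucketed by value (Counter of the counts) and emitted from the largest possible count down, assigning rank multipliers in emission order.
import Mathlib
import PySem

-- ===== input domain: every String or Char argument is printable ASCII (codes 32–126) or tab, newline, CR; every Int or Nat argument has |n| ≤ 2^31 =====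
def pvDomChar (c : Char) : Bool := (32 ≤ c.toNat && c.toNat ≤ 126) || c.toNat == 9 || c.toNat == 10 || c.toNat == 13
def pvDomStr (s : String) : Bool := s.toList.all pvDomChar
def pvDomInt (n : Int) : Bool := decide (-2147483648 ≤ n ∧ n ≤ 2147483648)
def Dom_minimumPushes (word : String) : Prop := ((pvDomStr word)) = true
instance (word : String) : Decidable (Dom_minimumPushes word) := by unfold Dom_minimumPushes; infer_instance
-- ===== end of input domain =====

-- B replaces A's most_common() comparison sort and mutable 8-slot keys array by a
-- counting sort over occurrence-count buckets (objective: simpler bookkeeping, no sort).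

-- ===== PORT A =====
-- the loop body of A: state (res, index, keys); 'keys[index]' and 'keys[index] += 1'
-- are PySem.List.pyGetD / pySetD (index is always 0..7, so in range)
def pvStepA (s : Int × Int × List Int) (p : Char × Int) : Int × Int × List Int :=
  (s.1 + PySem.List.pyGetD s.2.2 s.2.1 0 * p.2,
   PySem.Int.mod (s.2.1 + 1) 8,
   PySem.List.pySetD s.2.2 s.2.1 (PySem.List.pyGetD s.2.2 s.2.1 0 + 1))

def minimumPushes (word : String) : Int :=
  -- counter.most_common() is sorted(counter.items(), key=itemgetter(1), reverse=True)
  let counter := PySem.Dict.counter word.toList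
  let mc := PySem.List.sorted counter.items (fun p => p.2) true
  (mc.foldl pvStepA (0, 0, PySem.List.pyRepeat [1] 8)).1

-- ===== PORT B =====
-- body of B's inner loop: state (res, i)
def pvEmit (c : Int) (t : Int × Int) : Int × Int :=
  (t.1 + (PySem.Int.floordiv t.2 8 + 1) * c, t.2 + 1)

def minimumPushes_alt (word : String) : Int :=
  let freq := PySem.Dict.counter word.toList
  let bk := PySem.Dict.counter freq.values
  ((PySem.List.pyRange (word.toList.length : Int) 0 (-1)).foldl
     (fun s c => (PySem.List.pyRange 0 (bk.getD c 0) 1).foldl (fun t _ => pvEmit c t) s)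
     (0, 0)).1

-- ===== PRECONDITION & SPEC =====
def Spec_minimumPushes (word : String) (out : Int) : Prop := out = minimumPushes_alt word
instance (word : String) (out : Int) : Decidable (Spec_minimumPushes word out) := by unfold Spec_minimumPushes; infer_instance

-- ===== CLAIM (what is proved, stated in full; the proofs are below) =====
def Claim_equal_minimumPushes : Prop := ∀ (word : String), Dom_minimumPushes word → Spec_minimumPushes word (minimumPushes word)

-- ===== LEMMAS AND PROOFS =====

-- the weighted rank sum both programs compute, over a list of counts starting at rank k
def pvW (l : List Int) (k : Int) : Int :=
  ((PySem.List.enumerate l k).map (fun p => (PySem.Int.floordiv p.1 8 + 1) * p.2)).sum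

-- ---------- A side: the cyclic keys array realises the rank multiplier i//8+1 ----------

-- keys after k loop iterations: slot j has been used ⌈(k-j)/8⌉ times
def pvKeysAt (k : Nat) : List Int :=
  (List.range 8).map (fun j => ((1 + (k + 7 - j) / 8 : Nat) : Int))

theorem pvKeysAt_get (k : Nat) :
    PySem.List.pyGetD (pvKeysAt k) ((k % 8 : Nat) : Int) 0 = ((k / 8 + 1 : Nat) : Int) := by
  rw [PySem.List.pyGetD_natCast]
  unfold pvKeysAt
  rw [List.getD_eq_getElem _ _ (by simp; omega)]
  simp only [List.getElem_map, List.getElem_range]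
  congr 1
  omega

theorem pvKeysAt_set (k : Nat) :
    PySem.List.pySetD (pvKeysAt k) ((k % 8 : Nat) : Int)
      (((k / 8 + 1 : Nat) : Int) + 1) = pvKeysAt (k + 1) := by
  rw [PySem.List.pySetD_natCast]
  unfold pvKeysAt
  apply List.ext_getElem
  · simp
  · intro j h1 h2
    simp only [List.length_set, List.length_map, List.length_range] at h1
    rw [List.getElem_set]
    simp only [List.getElem_map, List.getElem_range]
    split_ifs with hj <;> push_cast <;> omega

theorem pvIndexAt_step (k : Nat) :
    PySem.Int.mod (((k % 8 : Nat) : Int) + 1) 8 = (((k + 1) % 8 : Nat) : Int) := by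
  rw [show (((k % 8 : Nat) : Int) + 1) = ((k % 8 + 1 : Nat) : Int) by push_cast; ring,
      show (8 : Int) = ((8 : Nat) : Int) by norm_num,
      PySem.Int.mod_natCast]
  congr 1
  omega

theorem pvFloordiv_nat (k : Nat) :
    PySem.Int.floordiv ((k : Nat) : Int) 8 = ((k / 8 : Nat) : Int) := by
  rw [show (8 : Int) = ((8 : Nat) : Int) by norm_num, PySem.Int.floordiv_natCast]

-- the loop invariant: A's fold from iteration k equals the closed-form rank sum
theorem pvFoldA_eq (l : List (Char × Int)) :
    ∀ (k : Nat) (res : Int),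
      (l.foldl pvStepA (res, ((k % 8 : Nat) : Int), pvKeysAt k)).1
        = res + pvW (l.map (·.2)) (k : Int) := by
  induction l with
  | nil => intro k res; simp [pvW, PySem.List.enumerate_nil]
  | cons p t ih =>
    intro k res
    simp only [List.foldl_cons, List.map_cons, pvW, PySem.List.enumerate_cons, List.map_cons,
      List.sum_cons]
    have hstep : pvStepA (res, ((k % 8 : Nat) : Int), pvKeysAt k) p
        = (res + ((k / 8 + 1 : Nat) : Int) * p.2, (((k + 1) % 8 : Nat) : Int), pvKeysAt (k + 1)) := by
      unfold pvStepA
      dsimp only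
      rw [pvKeysAt_get, pvKeysAt_set, pvIndexAt_step]
    rw [hstep]
    have := ih (k + 1) (res + ((k / 8 + 1 : Nat) : Int) * p.2)
    simp only [pvW] at this
    rw [show ((k : Int) + 1) = (((k + 1 : Nat)) : Int) by push_cast; ring, this,
        pvFloordiv_nat]
    push_cast
    ring

-- the descending count lists agree: map snd of sorted-items-by-snd = sorted values
theorem pvCounts_eq (word : String) :
    (PySem.List.sorted (PySem.Dict.counter word.toList).items (fun p => p.2) true).map (·.2)
      = PySem.List.sorted (PySem.Dict.counter word.toList).values (fun c => c) true := by
  set d := PySem.Dict.counter word.toList with hd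
  set l1 := (PySem.List.sorted d.items (fun p => p.2) true).map (·.2) with hl1
  set l2 := PySem.List.sorted d.values (fun c => c) true with hl2
  have hperm : l1.Perm l2 := by
    have h1 : l1.Perm d.values :=
      (PySem.List.sorted_perm d.items (fun p => p.2) true).map _
    have h2 : l2.Perm d.values := PySem.List.sorted_perm d.values (fun c => c) true
    exact h1.trans h2.symm
  have p1 : l1.Pairwise (fun a b : Int => b ≤ a) :=
    List.Pairwise.map _ (fun _ _ h => h) (PySem.List.sorted_pairwise_rev d.items (fun p => p.2))
  have p2 : l2.Pairwise (fun a b : Int => b ≤ a) :=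
    PySem.List.sorted_pairwise_rev d.values (fun c => c)
  have : l1.reverse = l2.reverse := by
    apply PySem.List.eq_of_perm_of_pairwise_le_of_injective (key := fun x : Int => x)
      (fun a b h => h)
    · exact (l1.reverse_perm.trans hperm).trans l2.reverse_perm.symm
    · exact (List.pairwise_reverse).mpr p1
    · exact (List.pairwise_reverse).mpr p2
  exact List.reverse_inj.mp this

-- ---------- B side: the counting-sort emission is the rank sum over its flattened list ----------

-- the flattened list of counts B's double loop walks
def pvFlat (f : Int → Nat) (rng : List Int) : List Int :=
  rng.flatMap (fun c => List.replicate (f c) c)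

-- emitting a whole list of counts from state (res, k)
theorem pvFoldEmit (l : List Int) :
    ∀ (k res : Int),
      l.foldl (fun t c => pvEmit c t) (res, k) = (res + pvW l k, k + l.length) := by
  induction l with
  | nil => intro k res; simp [pvW, PySem.List.enumerate_nil]
  | cons c t ih =>
    intro k res
    rw [List.foldl_cons,
        show pvEmit c (res, k) = (res + (PySem.Int.floordiv k 8 + 1) * c, k + 1) from rfl, ih]
    simp only [pvW, PySem.List.enumerate_cons, List.map_cons, List.sum_cons, List.length_cons,
      Prod.mk.injEq]
    constructor
    · ring
    · push_cast; ring

-- B's inner loop ignores the loop variable: it is the emit fold over a replicate block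
theorem pvInner_eq (c m : Int) (s : Int × Int) :
    (PySem.List.pyRange 0 m 1).foldl (fun t _ => pvEmit c t) s
      = (List.replicate m.toNat c).foldl (fun t c => pvEmit c t) s := by
  have hlen : (PySem.List.pyRange 0 m 1).length = m.toNat := by
    rw [PySem.List.length_pyRange_one]; omega
  rw [← hlen]
  generalize (PySem.List.pyRange 0 m 1) = l
  induction l generalizing s with
  | nil => simp
  | cons a t ih => simp [List.replicate_succ, ih]

-- B's whole double loop is the emit fold over the flattened list
theorem pvFoldB_eq (g : Int → Int) (rng : List Int) (s : Int × Int) :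
    rng.foldl (fun s c => (PySem.List.pyRange 0 (g c) 1).foldl
        (fun t _ => pvEmit c t) s) s
      = (pvFlat (fun c => (g c).toNat) rng).foldl (fun t c => pvEmit c t) s := by
  induction rng generalizing s with
  | nil => simp [pvFlat]
  | cons a t ih =>
    simp only [List.foldl_cons, pvFlat, List.flatMap_cons, List.foldl_append]
    rw [pvInner_eq]
    exact ih _

-- count of v in the flattened list
theorem pvFlat_count (f : Int → Nat) (rng : List Int) (hnd : rng.Nodup) (v : Int) :
    (pvFlat f rng).count v = if v ∈ rng then f v else 0 := by
  induction rng with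
  | nil => simp [pvFlat]
  | cons a t ih =>
    simp only [List.nodup_cons] at hnd
    simp only [pvFlat, List.flatMap_cons, List.count_append, List.count_replicate]
    rw [show (List.flatMap (fun c => List.replicate (f c) c) t).count v
          = (pvFlat f t).count v from rfl, ih hnd.2]
    by_cases hva : v = a
    · subst hva
      simp [List.mem_cons, hnd.1]
    · simp [List.mem_cons, hva]
      intro h; exact absurd h.symm hva

-- the flattened list over a strictly decreasing range is weakly decreasing
theorem pvFlat_pairwise (f : Int → Nat) (rng : List Int)
    (hp : rng.Pairwise (fun a b => b < a)) :
    (pvFlat f rng).Pairwise (fun a b : Int => b ≤ a) := by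
  induction rng with
  | nil => simp [pvFlat]
  | cons a t ih =>
    rw [List.pairwise_cons] at hp
    simp only [pvFlat, List.flatMap_cons]
    refine List.pairwise_append.mpr ⟨?_, ih hp.2, ?_⟩
    · exact List.pairwise_replicate.mpr (Or.inr (le_refl a))
    · intro x hx y hy
      rw [List.eq_of_mem_replicate hx]
      rcases List.mem_flatMap.mp hy with ⟨c, hc, hyc⟩
      rw [List.eq_of_mem_replicate hyc]
      exact le_of_lt (hp.1 c hc)

-- the countdown range is strictly decreasing and duplicate-free
theorem pvRange_down_pairwise (n : Int) :
    (PySem.List.pyRange n 0 (-1)).Pairwise (fun a b => b < a) := by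
  rw [PySem.List.pyRange_neg_one_eq_reverse, List.pairwise_reverse]
  exact PySem.List.pairwise_lt_pyRange_one 1 (n + 1)

theorem pvRange_down_nodup (n : Int) :
    (PySem.List.pyRange n 0 (-1)).Nodup := by
  rw [PySem.List.pyRange_neg_one_eq_reverse]
  exact List.nodup_reverse.mpr (PySem.List.nodup_pyRange_one 1 (n + 1))

-- every value of Counter(xs) lies in (0, len xs]
theorem pvValues_range {α : Type} [DecidableEq α] [BEq α] [LawfulBEq α] (xs : List α) (v : Int)
    (hv : v ∈ (PySem.Dict.counter xs).values) : 0 < v ∧ v ≤ (xs.length : Int) := by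
  have hitems := PySem.Dict.items_counter xs
  have : (PySem.Dict.counter xs).values = ((PySem.Set.ofList xs : List α)).map
      (fun k => ((xs.count k : Nat) : Int)) := by
    simp only [PySem.Dict.values, hitems, List.map_map]
    rfl
  rw [this] at hv
  rcases List.mem_map.mp hv with ⟨k, hk, rfl⟩
  have hkmem : k ∈ xs := (PySem.Set.mem_ofList _ _).mp hk
  constructor
  · have : 1 ≤ xs.count k := List.one_le_count_iff.mpr hkmem
    exact_mod_cast this
  · exact_mod_cast List.count_le_length

-- the flattened list B walks IS the descending-sorted list of counter values
theorem pvFlat_eq_sorted (word : String) :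
    pvFlat (fun c => ((PySem.Dict.counter (PySem.Dict.counter word.toList).values).getD c 0).toNat)
        (PySem.List.pyRange (word.toList.length : Int) 0 (-1))
      = PySem.List.sorted (PySem.Dict.counter word.toList).values (fun c => c) true := by
  set vs := (PySem.Dict.counter word.toList).values with hvs
  set f : Int → Nat := fun c => ((PySem.Dict.counter vs).getD c 0).toNat with hf
  set rng := PySem.List.pyRange (word.toList.length : Int) 0 (-1) with hrng
  have hfv : ∀ c, f c = vs.count c := by
    intro c
    simp only [hf, PySem.Dict.getD_counter, Int.toNat_natCast]
  have hperm : (pvFlat f rng).Perm vs := by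
    rw [List.perm_iff_count]
    intro v
    rw [pvFlat_count f rng (pvRange_down_nodup _) v]
    by_cases hmem : v ∈ rng
    · rw [if_pos hmem, hfv]
    · rw [if_neg hmem]
      rw [hrng, PySem.List.mem_pyRange_neg_one] at hmem
      push Not at hmem
      symm
      rw [List.count_eq_zero]
      intro hv
      rcases pvValues_range word.toList v hv with ⟨h1, h2⟩
      omega
  have hsperm : (PySem.List.sorted vs (fun c => c) true).Perm vs :=
    PySem.List.sorted_perm vs (fun c => c) true
  have p1 : (pvFlat f rng).Pairwise (fun a b : Int => b ≤ a) :=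
    pvFlat_pairwise f rng (pvRange_down_pairwise _)
  have p2 : (PySem.List.sorted vs (fun c => c) true).Pairwise (fun a b : Int => b ≤ a) :=
    PySem.List.sorted_pairwise_rev vs (fun c => c)
  have hrev : (pvFlat f rng).reverse = (PySem.List.sorted vs (fun c => c) true).reverse := by
    apply PySem.List.eq_of_perm_of_pairwise_le_of_injective (key := fun x : Int => x)
      (fun a b h => h)
    · exact ((pvFlat f rng).reverse_perm.trans hperm).trans
        ((PySem.List.sorted vs (fun c => c) true).reverse_perm.trans hsperm).symm
    · exact (List.pairwise_reverse).mpr p1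
    · exact (List.pairwise_reverse).mpr p2
  exact List.reverse_inj.mp hrev

-- ===== VERDICT (by name: the statement is the Claim_ definition above) =====
theorem minimumPushes_spec : Claim_equal_minimumPushes := by
  intro word _
  unfold Spec_minimumPushes minimumPushes minimumPushes_alt
  simp only []
  -- B side: double loop → emit fold over the flattened list → rank sum over sorted counts
  rw [pvFoldB_eq (fun c => (PySem.Dict.counter (PySem.Dict.counter word.toList).values).getD c 0),
      pvFlat_eq_sorted, pvFoldEmit]
  -- A side: start state in invariant form, then the loop invariant and the counts agreement
  rw [show ((0 : Int), (0 : Int), PySem.List.pyRepeat [1] 8)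
        = ((0 : Int), (((0 : Nat) % 8 : Nat) : Int), pvKeysAt 0) by decide,
      pvFoldA_eq, pvCounts_eq]
  norm_num
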